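-- pv_equiv track=rewrite | github.com/bGZo/demo | script/imu_chess_work/0x09.py | firstPrint
-- ===== SOURCE A (Python) =====
-- def firstPrint(board, x, y):
--     ans = ''
--     moveList = [-4, -3, -2, -1, 0, 1, 2, 3, 4]
--     for i in range(len(moveList)):
--         if x+moveList[i] > 14:
--             continue
--         if x+moveList[i] < 0:
--             continue
--         ans+=board[x+moveList[i]][y]
--     return ans
-- ===== SOURCE B (Python) =====
-- def firstPrint(board, x, y):
--     # Recursive descent: start at the clamped lower edge and build the string
--     # back-to-front (head cell + recursive tail), no accumulator, no per-offset guards.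
--     def go(i):
--         if i > x + 4 or i > 14:
--             return ''
--         return board[i][y] + go(i + 1)
--     return go(max(0, x - 4))
-- ===== Notes on version B (the rewrite author's own statement) =====
-- stated objective: alternative
-- what changed: Replaces A's iterative offset loop with an accumulator and per-offset continue guards by a recursive descent from the clamped lower edge that builds the result back-to-front (cell + recursive suffix), stopping when the index passes x+4 or 14.
import Mathlib
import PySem

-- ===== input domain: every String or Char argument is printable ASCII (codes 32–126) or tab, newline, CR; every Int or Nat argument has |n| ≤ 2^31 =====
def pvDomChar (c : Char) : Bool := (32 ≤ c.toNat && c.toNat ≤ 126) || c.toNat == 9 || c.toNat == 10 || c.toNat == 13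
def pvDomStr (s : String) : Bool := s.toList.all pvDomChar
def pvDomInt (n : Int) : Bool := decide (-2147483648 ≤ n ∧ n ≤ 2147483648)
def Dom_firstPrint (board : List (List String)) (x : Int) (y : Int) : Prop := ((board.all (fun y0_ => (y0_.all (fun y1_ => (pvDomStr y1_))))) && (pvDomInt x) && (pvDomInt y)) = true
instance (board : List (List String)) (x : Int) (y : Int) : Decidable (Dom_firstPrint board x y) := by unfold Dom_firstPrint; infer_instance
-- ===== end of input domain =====

-- B replaces A's iterative offset loop (accumulator + per-offset continue guards)
-- by a recursive descent from the clamped lower edge that builds the string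
-- back-to-front (objective: alternative).

-- ===== PORT A =====
-- board[i][y]; the .getD defaults are unreachable under Pre_firstPrint (no IndexError there)
def pvCellA (board : List (List String)) (y : Int) (i : Int) : String :=
  (PySem.List.pyGet? ((PySem.List.pyGet? board i).getD []) y).getD ""

def firstPrint (board : List (List String)) (x : Int) (y : Int) : String :=
  let moveList : List Int := [-4, -3, -2, -1, 0, 1, 2, 3, 4]
  (List.range moveList.length).foldl
    (fun ans i =>
      let m := moveList.getD i 0   -- moveList[i]; i < len(moveList), so exact
      if x + m > 14 then ans
      else if x + m < 0 then ans
      else ans ++ pvCellA board y (x + m))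
    ""

-- ===== PORT B =====
-- board[i][y] as B reads it; defaults unreachable under Pre_firstPrint
def pvCellB (board : List (List String)) (y : Int) (i : Int) : String :=
  (PySem.List.pyGet? ((PySem.List.pyGet? board i).getD []) y).getD ""

-- B's inner recursive go(i): '' once i passes x+4 or 14, else cell ++ go(i+1)
def pvGoB (board : List (List String)) (x : Int) (y : Int) (i : Int) : String :=
  if i > x + 4 ∨ i > 14 then ""
  else pvCellB board y i ++ pvGoB board x y (i + 1)
termination_by (15 - i).toNat
decreasing_by simp at *; omega

def firstPrint_alt (board : List (List String)) (x : Int) (y : Int) : String :=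
  pvGoB board x y (max 0 (x - 4))

-- ===== PRECONDITION & SPEC =====
-- Pre_ excludes exactly the inputs where A raises IndexError: some accessed row index
-- i ∈ [max(0,x-4), min(14,x+4)] is ≥ len(board), or y is out of range for such a row.
def Pre_firstPrint (board : List (List String)) (x : Int) (y : Int) : Prop :=
  ∀ i ∈ List.range 15, (x - 4 ≤ (i : Int) ∧ (i : Int) ≤ x + 4) →
    i < board.length ∧ PySem.Raise.InRange (board.getD i []).length y
instance (board : List (List String)) (x : Int) (y : Int) : Decidable (Pre_firstPrint board x y) := by
  unfold Pre_firstPrint; infer_instance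

def pvWitness_firstPrint : List (List String) × Int × Int := ([["a"], ["b"], ["c"]], -2, 0)

def Spec_firstPrint (board : List (List String)) (x : Int) (y : Int) (out : String) : Prop := out = firstPrint_alt board x y
instance (board : List (List String)) (x : Int) (y : Int) (out : String) : Decidable (Spec_firstPrint board x y out) := by unfold Spec_firstPrint; infer_instance

-- ===== CLAIM (what is proved, stated in full; the proofs are below) =====
def Claim_equal_firstPrint : Prop := ∀ (board : List (List String)) (x : Int) (y : Int), Dom_firstPrint board x y → Pre_firstPrint board x y → Spec_firstPrint board x y (firstPrint board x y)

-- ===== LEMMAS AND PROOFS =====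

-- A's loop leaves the accumulator unchanged when every offset is guarded away
theorem foldA_skip (board : List (List String)) (x y : Int) (ml : List Int) (l : List Nat) (ans : String)
    (h : ∀ i ∈ l, x + ml.getD i 0 > 14 ∨ x + ml.getD i 0 < 0) :
    l.foldl (fun ans i =>
      let m := ml.getD i 0
      if x + m > 14 then ans
      else if x + m < 0 then ans
      else ans ++ pvCellA board y (x + m)) ans = ans := by
  induction l generalizing ans with
  | nil => rfl
  | cons a t ih =>
    simp only [List.foldl_cons]
    rcases h a (by simp) with hc | hc
    · rw [if_pos hc]; exact ih ans (fun i hi => h i (List.mem_cons_of_mem a hi))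
    · rw [if_neg (by omega), if_pos hc]; exact ih ans (fun i hi => h i (List.mem_cons_of_mem a hi))

-- B's recursion terminates immediately off the window
theorem pvGoB_stop (board : List (List String)) (x y i : Int) (h : i > x + 4 ∨ i > 14) :
    pvGoB board x y i = "" := by
  rw [pvGoB]; exact if_pos h

-- off-window x: both sides produce the empty string
theorem firstPrint_eq_alt_outside (board : List (List String)) (x y : Int) (hx : x < -4 ∨ 18 < x) :
    firstPrint board x y = firstPrint_alt board x y := by
  rw [firstPrint_alt, pvGoB_stop board x y _ (by rcases hx with h | h <;> [left; right] <;> omega)]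
  exact foldA_skip board x y _ _ "" (by
    intro i hi
    have : i < 9 := List.mem_range.mp hi
    interval_cases i <;> simp <;> omega)

-- ===== VERDICT (by name: the statement is the Claim_ definition above) =====
theorem firstPrint_spec : Claim_equal_firstPrint := by
  intro board x y _ _
  show firstPrint board x y = firstPrint_alt board x y
  rcases lt_or_ge x (-4) with h1 | h1
  · exact firstPrint_eq_alt_outside board x y (Or.inl h1)
  rcases lt_or_ge 18 x with h2 | h2
  · exact firstPrint_eq_alt_outside board x y (Or.inr h2)
  interval_cases x <;>
    simp [firstPrint, firstPrint_alt, pvCellA, pvCellB, pvGoB, List.range_succ,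
      String.append_assoc]
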